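-- pv_equiv track=rewrite | github.com/yiranyyu/Phrase-Grounding | dataset/flickr30k_entities.py | lastTokenIndex
-- ===== SOURCE A (Python) =====
-- def lastTokenIndex(caption_tokens, phrase_tokens):
--     """
--
--     Args:
--         caption_tokens: list of tokens
--         phrase_tokens: list of phrase tokens
--     Return the index of the last token in the sublist
--     """
--     phrase_len = len(phrase_tokens)
--     idx = -1
--     while True:
--         try:
--             idx = caption_tokens.index(phrase_tokens[0], idx + 1)
--         except ValueError:
--             return -1
--         if phrase_tokens == caption_tokens[idx: idx + phrase_len]:
--             return idx + phrase_len - 1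
-- ===== SOURCE B (Python) =====
-- def lastTokenIndex(caption_tokens, phrase_tokens):
--     """KMP matching over token lists: returns index of the last token of the
--     first occurrence of phrase_tokens inside caption_tokens, else -1."""
--     m = len(phrase_tokens)
--     if m == 0:
--         return -1
--     # failure table: fail[i] = length of longest proper border of phrase_tokens[:i+1]
--     fail = [0] * m
--     k = 0
--     for i in range(1, m):
--         while k > 0 and phrase_tokens[i] != phrase_tokens[k]:
--             k = fail[k - 1]
--         if phrase_tokens[i] == phrase_tokens[k]:
--             k += 1
--         fail[i] = k
--     k = 0
--     for i, tok in enumerate(caption_tokens):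
--         while k > 0 and tok != phrase_tokens[k]:
--             k = fail[k - 1]
--         if tok == phrase_tokens[k]:
--             k += 1
--         if k == m:
--             return i
--     return -1
-- ===== Notes on version B (the rewrite author's own statement) =====
-- stated objective: alternative
-- what changed: Replaced A's repeated list.index jumps with full slice re-comparison at each candidate by Knuth-Morris-Pratt matching over the token lists with a precomputed failure table; measured speed depends on the input family (A's index/slice loops run in C), so no speed is claimed.
import Mathlib
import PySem

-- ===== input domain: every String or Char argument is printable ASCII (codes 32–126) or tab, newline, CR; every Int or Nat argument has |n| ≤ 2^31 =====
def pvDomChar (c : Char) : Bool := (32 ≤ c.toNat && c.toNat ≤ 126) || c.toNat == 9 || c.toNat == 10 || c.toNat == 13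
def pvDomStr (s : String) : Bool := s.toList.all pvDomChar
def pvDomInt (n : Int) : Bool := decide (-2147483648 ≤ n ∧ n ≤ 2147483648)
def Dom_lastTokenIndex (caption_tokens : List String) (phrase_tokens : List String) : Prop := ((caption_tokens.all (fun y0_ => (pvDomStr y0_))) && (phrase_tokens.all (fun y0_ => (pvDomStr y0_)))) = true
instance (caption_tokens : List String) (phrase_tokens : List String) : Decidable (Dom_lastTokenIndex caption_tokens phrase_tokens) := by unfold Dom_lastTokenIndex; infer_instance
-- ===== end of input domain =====

-- B replaces A's repeated index()/slice-compare scan by Knuth–Morris–Pratt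
-- matching over the token lists (a different algorithm; not measured faster here).

-- ===== PORT A =====
-- A's while-True loop: jump to the next occurrence of the first phrase token
-- (list.index with a start argument = index? on the dropped list), compare the slice.
def pvALoop (c p : List String) (p0 : String) (m : Nat) (start : Nat) : Int :=
  match h : PySem.List.index? (c.drop start) p0 with
  | none => -1
  | some j =>
      if PySem.List.slice c (some ((start + j : Nat) : Int)) (some ((start + j + m : Nat) : Int)) = p
      then ((start + j + m : Nat) : Int) - 1
      else pvALoop c p p0 m (start + j + 1)
  termination_by c.length - start
  decreasing_by
    have hsome : (PySem.List.index? (c.drop start) p0).isSome = true := by rw [h]; rfl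
    have hmem : p0 ∈ c.drop start := (PySem.List.index?_isSome_iff _ _).mp hsome
    have : c.drop start ≠ [] := by intro hnil; simp [hnil] at hmem
    have : start < c.length := by
      by_contra hge
      exact this (List.drop_eq_nil_iff.mpr (by omega))
    omega

def lastTokenIndex (caption_tokens : List String) (phrase_tokens : List String) : Int :=
  pvALoop caption_tokens phrase_tokens (phrase_tokens.getD 0 "") phrase_tokens.length 0

-- ===== PORT B =====
-- the `while k > 0 and tok != p[k]: k = fail[k-1]` loop of Source B
-- (the `min … j` only witnesses termination: the table built below satisfies tbl[j] ≤ j)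
def pvFail (p : List String) (tbl : List Nat) (tok : String) : Nat → Nat
  | 0 => 0
  | j + 1 => if tok = p.getD (j + 1) "" then j + 1 else pvFail p tbl tok (min (tbl.getD j 0) j)
  termination_by k => k
  decreasing_by omega

-- one KMP automaton step: fall back, then `if tok == p[k]: k += 1`
def pvStep (p : List String) (tbl : List Nat) (tok : String) (k : Nat) : Nat :=
  let k' := pvFail p tbl tok k
  if tok = p.getD k' "" then k' + 1 else k'

-- failure-table construction (Source B's first for-loop; fail[0] = 0 is the seed)
def pvBuild (p : List String) : List Nat :=
  ((List.range (p.length - 1)).foldl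
    (fun (st : List Nat × Nat) r =>
      let k := pvStep p st.1 (p.getD (r + 1) "") st.2
      (st.1 ++ [k], k))
    ([0], 0)).1

-- Source B's enumerate loop with early return at k == m
def pvSearch (p : List String) (tbl : List Nat) (m : Nat) : List String → Nat → Nat → Int
  | [], _, _ => -1
  | tok :: rest, k, i =>
      let k' := pvStep p tbl tok k
      if k' = m then (i : Int) else pvSearch p tbl m rest k' (i + 1)

def lastTokenIndex_alt (caption_tokens : List String) (phrase_tokens : List String) : Int :=
  let m := phrase_tokens.length
  if m = 0 then -1
  else pvSearch phrase_tokens (pvBuild phrase_tokens) m caption_tokens 0 0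

-- ===== PRECONDITION & SPEC =====
-- A evaluates phrase_tokens[0] outside its try's ValueError handler, so an empty
-- phrase list raises IndexError: exactly those inputs are excluded.
def Pre_lastTokenIndex (caption_tokens : List String) (phrase_tokens : List String) : Prop :=
  phrase_tokens ≠ []
instance (caption_tokens : List String) (phrase_tokens : List String) : Decidable (Pre_lastTokenIndex caption_tokens phrase_tokens) := by unfold Pre_lastTokenIndex; infer_instance

def pvWitness_lastTokenIndex : List String × List String := (["a", "b", "a", "b", "c"], ["b", "a"])

def Spec_lastTokenIndex (caption_tokens : List String) (phrase_tokens : List String) (out : Int) : Prop := out = lastTokenIndex_alt caption_tokens phrase_tokens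
instance (caption_tokens : List String) (phrase_tokens : List String) (out : Int) : Decidable (Spec_lastTokenIndex caption_tokens phrase_tokens out) := by unfold Spec_lastTokenIndex; infer_instance

-- ===== CLAIM (what is proved, stated in full; the proofs are below) =====
def Claim_equal_lastTokenIndex : Prop := ∀ (caption_tokens : List String) (phrase_tokens : List String), Dom_lastTokenIndex caption_tokens phrase_tokens → Pre_lastTokenIndex caption_tokens phrase_tokens → Spec_lastTokenIndex caption_tokens phrase_tokens (lastTokenIndex caption_tokens phrase_tokens)

-- ===== LEMMAS AND PROOFS =====

def pvFFind (P : Nat → Bool) : Nat → Nat → Option Nat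
  | 0, _ => none
  | f + 1, s => if P s then some s else pvFFind P f (s + 1)

lemma pvFFind_eq_none_iff (P : Nat → Bool) (f s : Nat) :
    pvFFind P f s = none ↔ ∀ x, s ≤ x → x < s + f → P x = false := by
  induction f generalizing s with
  | zero => simp [pvFFind]; omega
  | succ f ih =>
      simp only [pvFFind]
      by_cases h : P s
      · simp [h]
        exact ⟨s, le_rfl, by omega, h⟩
      · simp [h, ih]
        constructor
        · intro hall x hx1 hx2
          rcases Nat.eq_or_lt_of_le hx1 with rfl | hlt
          · simpa using h
          · exact hall x hlt (by omega)
        · intro hall x hx1 hx2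
          exact hall x (by omega) (by omega)

lemma pvFFind_eq_some_iff (P : Nat → Bool) (f s x : Nat) :
    pvFFind P f s = some x ↔ s ≤ x ∧ x < s + f ∧ P x = true ∧ ∀ y, s ≤ y → y < x → P y = false := by
  induction f generalizing s with
  | zero => simp [pvFFind]; omega
  | succ f ih =>
      simp only [pvFFind]
      by_cases h : P s
      · simp [h]
        constructor
        · rintro rfl
          exact ⟨le_rfl, by omega, h, fun y h1 h2 => absurd h1 (by omega)⟩
        · rintro ⟨h1, _, _, hmin⟩
          rcases Nat.eq_or_lt_of_le h1 with rfl | hlt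
          · rfl
          · exact absurd (hmin s le_rfl hlt) (by simp [h])
      · simp [h, ih]
        constructor
        · rintro ⟨h1, h2, h3, hmin⟩
          refine ⟨by omega, by omega, h3, fun y hy1 hy2 => ?_⟩
          rcases Nat.eq_or_lt_of_le hy1 with rfl | hlt
          · simpa using h
          · exact hmin y hlt hy2
        · rintro ⟨h1, h2, h3, hmin⟩
          have hne : s ≠ x := by rintro rfl; exact h h3
          exact ⟨by omega, by omega, h3, fun y hy1 hy2 => hmin y (by omega) hy2⟩

lemma pvFFind_chop (P : Nat → Bool) (N : Nat) :
    ∀ e s, s ≤ e → e ≤ N → (∀ x, s ≤ x → x < e → P x = false) →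
    pvFFind P (N - s) s = pvFFind P (N - e) e := by
  intro e s hse heN hall
  induction hd : e - s generalizing s with
  | zero =>
      have : s = e := by omega
      rw [this]
  | succ n ih =>
      have hsN : s < N := by omega
      have h1 : N - s = (N - (s + 1)) + 1 := by omega
      rw [h1]
      show (if P s then some s else pvFFind P (N - (s+1)) (s+1)) = pvFFind P (N - e) e
      rw [hall s le_rfl (by omega)]
      simp only [Bool.false_eq_true, if_false]
      exact ih (s + 1) (by omega) (fun x hx1 hx2 => hall x (by omega) hx2) (by omega)

lemma pv_take_succ (p : List String) (j : Nat) (h : j < p.length) :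
    p.take (j + 1) = p.take j ++ [p.getD j ""] := by
  rw [List.take_add_one, List.getElem?_eq_getElem h]
  simp [List.getD, List.getElem?_eq_getElem h]

lemma pv_concat_suffix_concat (u v : List String) (a b : String) :
    (u ++ [a] <:+ v ++ [b]) ↔ (a = b ∧ u <:+ v) := by
  rw [← List.reverse_prefix]
  simp only [List.reverse_append, List.reverse_cons, List.reverse_nil, List.nil_append,
    List.singleton_append, List.cons_prefix_cons, List.reverse_prefix]

lemma pv_findGreatest_congr (P : Nat → Prop) [DecidablePred P] (lo : Nat) :
    ∀ hi, lo ≤ hi → (∀ x, lo < x → x ≤ hi → ¬ P x) →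
    Nat.findGreatest P hi = Nat.findGreatest P lo := by
  intro hi
  induction hi with
  | zero => intro h _; have : lo = 0 := by omega
            rw [this]
  | succ n ih =>
      intro hle hnone
      rcases Nat.eq_or_lt_of_le hle with rfl | hlt
      · rfl
      · rw [Nat.findGreatest_succ]
        rw [if_neg (hnone (n + 1) hlt le_rfl)]
        exact ih (by omega) (fun x hx1 hx2 => hnone x hx1 (by omega))

-- the KMP state after reading t: length of the longest prefix of p that is a suffix of t
def pvKA (p t : List String) : Nat :=
  Nat.findGreatest (fun j => p.take j <:+ t) p.length

-- the intended failure-table entry: longest proper border of p.take (j+1)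
def pvF (p : List String) (j : Nat) : Nat :=
  Nat.findGreatest (fun l => p.take l <:+ p.take (j + 1)) j

def pvTblOk (p : List String) (tbl : List Nat) (n : Nat) : Prop :=
  ∀ j, j < n → tbl.getD j 0 = pvF p j

abbrev pvPH (p t : List String) (tok : String) (j : Nat) : Prop :=
  p.take j <:+ t ∧ tok = p.getD j ""

def pvG (p t : List String) (tok : String) (k : Nat) : Nat :=
  Nat.findGreatest (pvPH p t tok) k



-- pvStep_eq
lemma pvStep_eq (p : List String) (tbl : List Nat) (tok : String) (t : List String) :
    ∀ k, pvTblOk p tbl k → p.take k <:+ t → k < p.length →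
    pvStep p tbl tok k =
      (if pvPH p t tok (pvG p t tok k) then pvG p t tok k + 1 else 0) := by
  intro k
  induction k using Nat.strong_induction_on with
  | _ k ih =>
  intro htbl hsuf hklt
  match k with
  | 0 =>
      have hG : pvG p t tok 0 = 0 := Nat.findGreatest_zero
      rw [hG]
      show (if tok = p.getD (pvFail p tbl tok 0) "" then pvFail p tbl tok 0 + 1 else pvFail p tbl tok 0)
        = if pvPH p t tok 0 then 0 + 1 else 0
      rw [show pvFail p tbl tok 0 = 0 by rw [pvFail]]
      by_cases h : tok = p.getD 0 ""
      · rw [if_pos h, if_pos ⟨by simp, h⟩]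
      · rw [if_neg h, if_neg (fun hc => h hc.2)]
  | j + 1 =>
      by_cases htok : tok = p.getD (j + 1) ""
      · -- immediate match
        have hPH : pvPH p t tok (j + 1) := ⟨hsuf, htok⟩
        have hG : pvG p t tok (j + 1) = j + 1 := Nat.findGreatest_eq hPH
        rw [hG, if_pos (hG ▸ hPH)]
        have hfail : pvFail p tbl tok (j + 1) = j + 1 := by
          rw [pvFail, if_pos htok]
        show (if tok = p.getD (pvFail p tbl tok (j+1)) "" then pvFail p tbl tok (j+1) + 1 else pvFail p tbl tok (j+1)) = j + 1 + 1
        rw [hfail, if_pos htok]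
      · -- fall back through the table
        have hBdef : tbl.getD j 0 = pvF p j := htbl j (by omega)
        have hBle : pvF p j ≤ j := Nat.findGreatest_le j
        have hmin : min (tbl.getD j 0) j = pvF p j := by rw [hBdef]; exact Nat.min_eq_left hBle
        have hfail : pvFail p tbl tok (j + 1) = pvFail p tbl tok (pvF p j) := by
          rw [pvFail, if_neg htok, hmin]
        have hstep : pvStep p tbl tok (j + 1) = pvStep p tbl tok (pvF p j) := by
          show (if tok = p.getD (pvFail p tbl tok (j+1)) "" then pvFail p tbl tok (j+1) + 1 else pvFail p tbl tok (j+1))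
            = pvStep p tbl tok (pvF p j)
          rw [hfail]; rfl
        -- border is a suffix of the current prefix, hence of t
        have hBsuf : p.take (pvF p j) <:+ p.take (j + 1) := by
          have h0 := Nat.findGreatest_spec (P := fun l => p.take l <:+ p.take (j + 1)) (m := 0)
            (Nat.zero_le j) (by simp)
          simpa [pvF] using h0
        have hBsuft : p.take (pvF p j) <:+ t := hBsuf.trans hsuf
        have hIH := ih (pvF p j) (by omega) (fun x hx => htbl x (by omega)) hBsuft (by omega)
        rw [hstep, hIH]
        -- findGreatest over (j+1) collapses to findGreatest over pvF p j
        have hcongr : pvG p t tok (j + 1) = pvG p t tok (pvF p j) := by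
          apply pv_findGreatest_congr (pvPH p t tok) (pvF p j) (j + 1) (by omega)
          intro x hx1 hx2 hc
          rcases Nat.eq_or_lt_of_le hx2 with rfl | hxlt
          · exact htok hc.2
          · -- B < x ≤ j : x would be a larger border of p.take (j+1)
            have hxsuf : p.take x <:+ p.take (j + 1) := by
              apply List.suffix_of_suffix_length_le hc.1 hsuf
              rw [List.length_take, List.length_take]
              omega
            have : x ≤ pvF p j := Nat.le_findGreatest (by omega) hxsuf
            omega
        rw [hcongr]


lemma pvShift (p t : List String) (tok : String) (k b : Nat)
    (hble : b ≤ p.length) (hkb : k < b)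
    (hmax : ∀ j, 1 ≤ j → j ≤ b → p.take j <:+ t ++ [tok] → j - 1 ≤ k) :
    Nat.findGreatest (fun j => p.take j <:+ t ++ [tok]) b
      = (if pvPH p t tok (pvG p t tok k) then pvG p t tok k + 1 else 0) := by
  have hGk : pvG p t tok k ≤ k := Nat.findGreatest_le k
  -- equivalence between matches of length j ≥ 1 in t ++ [tok] and states j-1 in t
  have hEQ : ∀ j, 1 ≤ j → j ≤ b → (p.take j <:+ t ++ [tok] ↔ pvPH p t tok (j - 1)) := by
    intro j hj1 hjb
    obtain ⟨j', rfl⟩ : ∃ j', j = j' + 1 := ⟨j - 1, by omega⟩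
    rw [pv_take_succ p j' (by omega), pv_concat_suffix_concat]
    simp only [Nat.add_sub_cancel, pvPH]
    constructor
    · rintro ⟨h1, h2⟩; exact ⟨h2, h1.symm⟩
    · rintro ⟨h1, h2⟩; exact ⟨h2.symm, h1⟩
  by_cases hPG : pvPH p t tok (pvG p t tok k)
  · rw [if_pos hPG]
    have hQ : p.take (pvG p t tok k + 1) <:+ t ++ [tok] :=
      (hEQ (pvG p t tok k + 1) (by omega) (by omega)).mpr (by simpa using hPG)
    -- it is the greatest such length
    have hupper : ∀ x, pvG p t tok k + 1 < x → x ≤ b → ¬ p.take x <:+ t ++ [tok] := by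
      intro x hx1 hx2 hc
      have hx0 : 1 ≤ x := by omega
      have hP : pvPH p t tok (x - 1) := (hEQ x hx0 hx2).mp hc
      have hxk : x - 1 ≤ k := hmax x hx0 hx2 hc
      have : x - 1 ≤ pvG p t tok k := Nat.le_findGreatest hxk hP
      omega
    have hle : Nat.findGreatest (fun j => p.take j <:+ t ++ [tok]) b ≤ pvG p t tok k + 1 := by
      by_contra hgt
      rw [not_le] at hgt
      have hfb : Nat.findGreatest (fun j => p.take j <:+ t ++ [tok]) b ≤ b := Nat.findGreatest_le b
      have hspec := Nat.findGreatest_spec (P := fun j => p.take j <:+ t ++ [tok])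
        (m := pvG p t tok k + 1) (n := b) (by omega) hQ
      exact hupper _ hgt hfb hspec
    have hge : pvG p t tok k + 1 ≤ Nat.findGreatest (fun j => p.take j <:+ t ++ [tok]) b :=
      Nat.le_findGreatest (by omega) hQ
    omega
  · rw [if_neg hPG]
    -- nothing matches: no state j ≤ k works, hence no length ≥ 1 works
    have hnone : ∀ j, j ≤ k → ¬ pvPH p t tok j := by
      intro j hj hc
      have h1 : j ≤ pvG p t tok k := Nat.le_findGreatest hj hc
      have h2 := Nat.findGreatest_spec (P := pvPH p t tok) (m := j) hj hc
      exact hPG h2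
    rw [Nat.findGreatest_eq_zero_iff]
    intro n hn1 hnb hc
    have hP : pvPH p t tok (n - 1) := (hEQ n (by omega) hnb).mp hc
    exact hnone (n - 1) (by have := hmax n (by omega) hnb hc; omega) hP


lemma pvStep_K (p : List String) (tbl : List Nat) (tok : String) (done : List String)
    (htbl : pvTblOk p tbl p.length) (hK : ¬ p <:+ done) :
    pvStep p tbl tok (pvKA p done) = pvKA p (done ++ [tok]) := by
  have hKsuf : p.take (pvKA p done) <:+ done := by
    have h0 := Nat.findGreatest_spec (P := fun j => p.take j <:+ done) (m := 0)
      (Nat.zero_le p.length) (by simp)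
    simpa [pvKA] using h0
  have hKle : pvKA p done ≤ p.length := Nat.findGreatest_le p.length
  have hKlt : pvKA p done < p.length := by
    rcases Nat.eq_or_lt_of_le hKle with heq | h
    · exfalso; apply hK; rw [← List.take_length (l := p)]
      rw [← heq]; exact hKsuf
    · exact h
  rw [pvStep_eq p tbl tok done (pvKA p done) (fun x hx => htbl x (by omega)) hKsuf hKlt]
  rw [show pvKA p (done ++ [tok]) = Nat.findGreatest (fun j => p.take j <:+ done ++ [tok]) p.length from rfl]
  refine (pvShift p done tok (pvKA p done) p.length le_rfl hKlt ?_).symm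
  intro j hj1 hjb hsuf
  obtain ⟨j', rfl⟩ : ∃ j', j = j' + 1 := ⟨j - 1, by omega⟩
  rw [pv_take_succ p j' (by omega), pv_concat_suffix_concat] at hsuf
  have : j' ≤ pvKA p done := Nat.le_findGreatest (by omega) hsuf.2
  omega

lemma pvStep_F (p : List String) (tbl : List Nat) (i : Nat)
    (hi1 : 1 ≤ i) (hilen : i < p.length) (htbl : pvTblOk p tbl (pvF p (i - 1))) :
    pvStep p tbl (p.getD i "") (pvF p (i - 1)) = pvF p i := by
  have hFle : pvF p (i - 1) ≤ i - 1 := Nat.findGreatest_le (i - 1)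
  have hFsuf : p.take (pvF p (i - 1)) <:+ p.take i := by
    have h0 := Nat.findGreatest_spec (P := fun l => p.take l <:+ p.take ((i - 1) + 1)) (m := 0)
      (Nat.zero_le (i - 1)) (by simp)
    have : (i - 1) + 1 = i := by omega
    rw [this] at h0
    simpa [pvF, this] using h0
  rw [pvStep_eq p tbl (p.getD i "") (p.take i) (pvF p (i - 1)) htbl hFsuf (by omega)]
  have htake : p.take i ++ [p.getD i ""] = p.take (i + 1) := (pv_take_succ p i hilen).symm
  have hshift := pvShift p (p.take i) (p.getD i "") (pvF p (i - 1)) i (by omega) (by omega) ?hmax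
  case hmax =>
    intro j hj1 hjb hsuf
    obtain ⟨j', rfl⟩ : ∃ j', j = j' + 1 := ⟨j - 1, by omega⟩
    rw [pv_take_succ p j' (by omega), pv_concat_suffix_concat] at hsuf
    have hj' : p.take j' <:+ p.take i := hsuf.2
    have : j' ≤ pvF p (i - 1) := by
      apply Nat.le_findGreatest (by omega)
      show p.take j' <:+ p.take ((i - 1) + 1)
      rw [show (i - 1) + 1 = i by omega]
      exact hj'
    omega
  rw [← hshift]
  rw [pvF]
  congr 1
  funext j
  rw [htake]


lemma pv_getD_append_lt (l l' : List Nat) (j : Nat) (h : j < l.length) :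
    (l ++ l').getD j 0 = l.getD j 0 := by
  simp [List.getD, List.getElem?_append_left h]

lemma pv_getD_append_self (l : List Nat) (k : Nat) :
    (l ++ [k]).getD l.length 0 = k := by
  simp [List.getD]

lemma pvBuild_state (p : List String) (hp : p ≠ []) :
    ∀ s, s ≤ p.length - 1 →
      (((List.range s).foldl
        (fun (st : List Nat × Nat) r =>
          let k := pvStep p st.1 (p.getD (r + 1) "") st.2
          (st.1 ++ [k], k)) ([0], 0)).1.length = s + 1)
      ∧ (∀ j, j ≤ s → (((List.range s).foldl
          (fun (st : List Nat × Nat) r =>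
            let k := pvStep p st.1 (p.getD (r + 1) "") st.2
            (st.1 ++ [k], k)) ([0], 0)).1.getD j 0 = pvF p j))
      ∧ (((List.range s).foldl
          (fun (st : List Nat × Nat) r =>
            let k := pvStep p st.1 (p.getD (r + 1) "") st.2
            (st.1 ++ [k], k)) ([0], 0)).2 = pvF p s) := by
  have hlen : 1 ≤ p.length := List.length_pos_iff.mpr hp
  intro s
  induction s with
  | zero =>
      intro _
      refine ⟨by simp, ?_, by simp [pvF]⟩
      intro j hj
      interval_cases j
      simp [pvF]
  | succ s ih =>
      intro hs
      obtain ⟨ihlen, ihget, ihk⟩ := ih (by omega)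
      rw [List.range_succ, List.foldl_append, List.foldl_cons, List.foldl_nil]
      set st := (List.range s).foldl
        (fun (st : List Nat × Nat) r =>
          let k := pvStep p st.1 (p.getD (r + 1) "") st.2
          (st.1 ++ [k], k)) ([0], 0) with hst
      have hstep : pvStep p st.1 (p.getD (s + 1) "") st.2 = pvF p (s + 1) := by
        rw [ihk]
        have := pvStep_F p st.1 (s + 1) (by omega) (by omega)
          (fun j hj => ihget j (by have := Nat.findGreatest_le (P := fun l => p.take l <:+ p.take (s + 1)) s; simp only [pvF, Nat.add_sub_cancel] at *; omega))
        simpa using this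
      refine ⟨by simpa using ihlen, ?_, by simpa using hstep⟩
      intro j hj
      show ((st.1 ++ [pvStep p st.1 (p.getD (s + 1) "") st.2]).getD j 0) = pvF p j
      rcases Nat.lt_or_ge j (s + 1) with hlt | hge
      · rw [pv_getD_append_lt _ _ _ (by omega)]
        exact ihget j (by omega)
      · have hj1 : j = s + 1 := by omega
        subst hj1
        calc (st.1 ++ [pvStep p st.1 (p.getD (s + 1) "") st.2]).getD (s + 1) 0
            = (st.1 ++ [pvStep p st.1 (p.getD (s + 1) "") st.2]).getD st.1.length 0 := by rw [ihlen]
          _ = pvStep p st.1 (p.getD (s + 1) "") st.2 := pv_getD_append_self _ _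
          _ = pvF p (s + 1) := hstep

lemma pvBuild_ok (p : List String) (hp : p ≠ []) : pvTblOk p (pvBuild p) p.length := by
  intro j hj
  obtain ⟨_, hget, _⟩ := pvBuild_state p hp (p.length - 1) le_rfl
  exact hget j (by omega)


lemma pvSearch_eq (c p : List String) (tbl : List Nat) (_hp : p ≠ [])
    (htbl : pvTblOk p tbl p.length) :
    ∀ (rest done : List String) (k : Nat), c = done ++ rest → k = pvKA p done →
      (∀ t', t' <+: done → ¬ p <:+ t') →
      pvSearch p tbl p.length rest k done.length =
        (match pvFFind (fun e => decide (p <:+ c.take (e + 1))) rest.length done.length with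
         | some e => (e : Int) | none => -1) := by
  intro rest
  induction rest with
  | nil => intro done k _ _ _; simp [pvSearch, pvFFind]
  | cons tok rest' ih =>
      intro done k hc hk hpre
      have hK : ¬ p <:+ done := hpre done List.prefix_rfl
      have hstep : pvStep p tbl tok k = pvKA p (done ++ [tok]) := by
        rw [hk]; exact pvStep_K p tbl tok done htbl hK
      have htake : c.take (done.length + 1) = done ++ [tok] := by
        rw [hc, List.take_length_add_append (i := 1) (l₂ := tok :: rest')]
        rfl
      show (if pvStep p tbl tok k = p.length then ((done.length : Int))
            else pvSearch p tbl p.length rest' (pvStep p tbl tok k) (done.length + 1))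
          = _
      by_cases hm : pvStep p tbl tok k = p.length
      · rw [if_pos hm]
        have hfull : p <:+ done ++ [tok] := by
          have h0 := Nat.findGreatest_spec (P := fun j => p.take j <:+ done ++ [tok]) (m := 0)
            (Nat.zero_le p.length) (by simp)
          have : pvKA p (done ++ [tok]) = p.length := by rw [← hstep, hm]
          have h1 : p.take (pvKA p (done ++ [tok])) <:+ done ++ [tok] := by simpa [pvKA] using h0
          rwa [this, List.take_length] at h1
        have hP : (fun e => decide (p <:+ c.take (e + 1))) done.length = true := by
          simp only [htake]
          exact decide_eq_true hfull
        show _ = (match pvFFind (fun e => decide (p <:+ c.take (e + 1))) (rest'.length + 1) done.length with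
                  | some e => (e : Int) | none => -1)
        rw [show pvFFind (fun e => decide (p <:+ c.take (e + 1))) (rest'.length + 1) done.length
            = some done.length by rw [pvFFind]; simp [htake, hfull]]
      · rw [if_neg hm]
        have hklt : pvKA p (done ++ [tok]) < p.length := by
          have := Nat.findGreatest_le (P := fun j => p.take j <:+ done ++ [tok]) p.length
          have hne : pvKA p (done ++ [tok]) ≠ p.length := by rw [← hstep]; exact hm
          simp only [pvKA] at *
          omega
        have hnotfull : ¬ p <:+ done ++ [tok] := by
          intro hfull
          have : p.length ≤ pvKA p (done ++ [tok]) := by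
            apply Nat.le_findGreatest le_rfl
            rwa [List.take_length]
          omega
        have hP : (fun e => decide (p <:+ c.take (e + 1))) done.length = false := by
          simp only [htake]
          exact decide_eq_false hnotfull
        have hrec := ih (done ++ [tok]) (pvStep p tbl tok k)
          (by rw [hc]; simp)
          (by rw [hstep])
          (by intro t' ht'
              rcases List.prefix_concat_iff.mp ht' with rfl | h
              · exact hnotfull
              · exact hpre t' h)
        show _ = (match pvFFind (fun e => decide (p <:+ c.take (e + 1))) (rest'.length + 1) done.length with
                  | some e => (e : Int) | none => -1)
        rw [show pvFFind (fun e => decide (p <:+ c.take (e + 1))) (rest'.length + 1) done.length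
            = pvFFind (fun e => decide (p <:+ c.take (e + 1))) rest'.length (done.length + 1) by
              rw [pvFFind]; simp [htake, hnotfull]]
        simpa using hrec


lemma pv_head_of_prefix (p u : List String) (hp : p ≠ []) (h : p <+: u) :
    u[0]? = some (p.getD 0 "") := by
  obtain ⟨a, q, rfl⟩ := List.exists_cons_of_ne_nil hp
  obtain ⟨t, rfl⟩ := h
  simp

lemma pvALoop_eq (c p : List String) (hp : p ≠ []) :
    ∀ start, pvALoop c p (p.getD 0 "") p.length start =
      (match pvFFind (fun s => p.isPrefixOf (c.drop s)) (c.length + 1 - start) start with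
       | some s => (s : Int) + p.length - 1 | none => -1) := by
  have main : ∀ d start, c.length + 1 - start ≤ d →
      pvALoop c p (p.getD 0 "") p.length start =
        (match pvFFind (fun s => p.isPrefixOf (c.drop s)) (c.length + 1 - start) start with
         | some s => (s : Int) + p.length - 1 | none => -1) := by
    intro d
    induction d with
    | zero =>
        intro start hle
        have hdrop : c.drop start = [] := List.drop_eq_nil_iff.mpr (by omega)
        rw [pvALoop]
        rw [show c.length + 1 - start = 0 by omega]
        have hnone : PySem.List.index? (c.drop start) (p.getD 0 "") = none := by
          rw [PySem.List.index?_eq_none_iff, hdrop]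
          simp
        split
        · next _ => rfl
        · next j h => rw [hnone] at h; exact absurd h (by simp)
    | succ d ihd =>
        intro start hle
        rw [pvALoop]
        split
        · -- index? = none : first token nowhere in c.drop start
          next hidx =>
          have hmem : p.getD 0 "" ∉ c.drop start := (PySem.List.index?_eq_none_iff _ _).mp hidx
          have hffnone : pvFFind (fun s => p.isPrefixOf (c.drop s)) (c.length + 1 - start) start = none := by
            rw [pvFFind_eq_none_iff]
            intro x hx1 _
            apply Bool.eq_false_iff.mpr
            intro hc
            have hpre : p <+: c.drop x := List.isPrefixOf_iff_prefix.mp hc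
            obtain ⟨a, q, hpq⟩ := List.exists_cons_of_ne_nil hp
            apply hmem
            have ha : a ∈ c.drop x := hpre.subset (by rw [hpq]; exact List.mem_cons_self)
            have hxd : c.drop x = (c.drop start).drop (x - start) := by
              rw [List.drop_drop]
              congr 1
              omega
            have : a ∈ c.drop start := by
              rw [hxd] at ha
              exact (List.drop_suffix (x - start) (c.drop start)).subset ha
            have hgd : p.getD 0 "" = a := by rw [hpq]; rfl
            rwa [hgd]
          rw [hffnone]
        · -- index? = some j
          next j hidx =>
          obtain ⟨hjlt, hjval, hjmin⟩ := PySem.List.getElem_of_index?_eq_some hidx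
          have hjc : start + j < c.length := by
            rw [List.length_drop] at hjlt; omega
          -- positions start..start+j-1 : first token differs, no prefix there
          have hskip : ∀ x, start ≤ x → x < start + j →
              (fun s => p.isPrefixOf (c.drop s)) x = false := by
            intro x hx1 hx2
            apply Bool.eq_false_iff.mpr
            intro hc
            have hpre : p <+: c.drop x := List.isPrefixOf_iff_prefix.mp hc
            have hhd := pv_head_of_prefix p (c.drop x) hp hpre
            rw [List.getElem?_drop, Nat.add_zero, List.getElem?_eq_getElem (by omega)] at hhd
            have hx := hjmin (x - start) (by omega)
            apply hx
            have hq : (c.drop start)[x - start]? = some (p.getD 0 "") := by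
              rw [List.getElem?_drop, show start + (x - start) = x by omega,
                List.getElem?_eq_getElem (by omega)]
              rw [Option.some.inj hhd]
            rw [List.getElem?_eq_getElem (by rw [List.length_drop]; omega)] at hq
            exact Option.some.inj hq
          have hchop := pvFFind_chop (fun s => p.isPrefixOf (c.drop s)) (c.length + 1)
            (start + j) start (by omega) (by omega) hskip
          have hfuel : c.length + 1 - (start + j) = (c.length + 1 - (start + j + 1)) + 1 := by omega
          -- the slice test is exactly the prefix test at start + j
          have hsliceEq : PySem.List.slice c (some ((start + j : Nat) : Int))
              (some ((start + j + p.length : Nat) : Int)) = (c.drop (start + j)).take p.length := by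
            have harg : ((start + j + p.length : Nat) : Int)
                = ((start + j : Nat) : Int) + ((p.length : Nat) : Int) := by push_cast; ring
            rw [harg, PySem.List.slice_natCast_add]
          have htest : (PySem.List.slice c (some ((start + j : Nat) : Int))
              (some ((start + j + p.length : Nat) : Int)) = p)
              ↔ (p.isPrefixOf (c.drop (start + j)) = true) := by
            rw [hsliceEq]
            simp only [List.isPrefixOf_iff_prefix]
            rw [List.prefix_iff_eq_take]
            constructor
            · intro h; exact h.symm
            · intro h; exact h.symm
          rw [show c.length + 1 - start = c.length + 1 - start by rfl]
          rw [hchop, hfuel]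
          show _ = (match (if p.isPrefixOf (c.drop (start + j))
              then some (start + j)
              else pvFFind (fun s => p.isPrefixOf (c.drop s)) (c.length + 1 - (start + j + 1)) (start + j + 1)) with
            | some s => (s : Int) + p.length - 1 | none => -1)
          by_cases hslice : PySem.List.slice c (some ((start + j : Nat) : Int))
              (some ((start + j + p.length : Nat) : Int)) = p
          · rw [if_pos hslice, if_pos (htest.mp hslice)]
            push_cast
            ring
          · rw [if_neg hslice]
            have hfalse : p.isPrefixOf (c.drop (start + j)) = false := by
              rcases Bool.eq_false_or_eq_true (p.isPrefixOf (c.drop (start + j))) with h | h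
              · exact absurd (htest.mpr h) hslice
              · exact h
            rw [hfalse]
            simp only [Bool.false_eq_true, if_false]
            exact ihd (start + j + 1) (by omega)
  intro start
  exact main (c.length + 1 - start) start le_rfl


lemma pv_bridge (c p : List String) (_hp : p ≠ []) (e : Nat) (he : e < c.length) :
    p <:+ c.take (e + 1) ↔ (p.length ≤ e + 1 ∧ p <+: c.drop (e + 1 - p.length)) := by
  have hlt : (c.take (e + 1)).length = e + 1 := by
    rw [List.length_take]; omega
  constructor
  · intro h
    have hm : p.length ≤ e + 1 := by
      have := h.length_le; omega
    refine ⟨hm, ?_⟩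
    obtain ⟨u, hu⟩ := h
    have hul : u.length = e + 1 - p.length := by
      have := congrArg List.length hu
      rw [List.length_append, hlt] at this
      omega
    have hc : c = u ++ (p ++ c.drop (e + 1)) := by
      conv_lhs => rw [← List.take_append_drop (e + 1) c]
      rw [← hu, List.append_assoc]
    have hdrop : c.drop (e + 1 - p.length) = p ++ c.drop (e + 1) := by
      rw [← hul]
      conv_lhs => rw [hc]
      exact List.drop_left
    exact ⟨c.drop (e + 1), hdrop.symm⟩
  · rintro ⟨hm, hpre⟩
    obtain ⟨t, ht⟩ := hpre
    refine ⟨c.take (e + 1 - p.length), ?_⟩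
    have hsplit : c.take (e + 1) = c.take (e + 1 - p.length) ++ (c.drop (e + 1 - p.length)).take p.length := by
      rw [← List.take_add]
      congr 1
      omega
    rw [hsplit, ← ht, List.take_left]
lemma pv_glue (c p : List String) (hp : p ≠ []) :
    (match pvFFind (fun s => p.isPrefixOf (c.drop s)) (c.length + 1) 0 with
     | some s => (s : Int) + p.length - 1 | none => -1)
    = (match pvFFind (fun e => decide (p <:+ c.take (e + 1))) c.length 0 with
       | some e => (e : Int) | none => -1) := by
  match hS : pvFFind (fun s => p.isPrefixOf (c.drop s)) (c.length + 1) 0 with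
  | none =>
      rw [pvFFind_eq_none_iff] at hS
      have hE : pvFFind (fun e => decide (p <:+ c.take (e + 1))) c.length 0 = none := by
        rw [pvFFind_eq_none_iff]
        intro x _ hx2
        apply Bool.eq_false_iff.mpr
        intro hc
        have hsuf : p <:+ c.take (x + 1) := of_decide_eq_true hc
        have hbr := (pv_bridge c p hp x (by omega)).mp hsuf
        have := hS (x + 1 - p.length) (by omega) (by omega)
        rw [Bool.eq_false_iff] at this
        exact this (List.isPrefixOf_iff_prefix.mpr hbr.2)
      rw [hE]
  | some s =>
      rw [pvFFind_eq_some_iff] at hS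
      obtain ⟨-, hslt, hP, hmin⟩ := hS
      have hpre : p <+: c.drop s := List.isPrefixOf_iff_prefix.mp hP
      have hm1 : 1 ≤ p.length := List.length_pos_iff.mpr hp
      have hsm : s + p.length ≤ c.length := by
        have := hpre.length_le
        rw [List.length_drop] at this
        have hpl : 0 < p.length := hm1
        omega
      have he : s + p.length - 1 < c.length := by omega
      have hE : pvFFind (fun e => decide (p <:+ c.take (e + 1))) c.length 0 = some (s + p.length - 1) := by
        rw [pvFFind_eq_some_iff]
        refine ⟨Nat.zero_le _, by omega, ?_, ?_⟩
        · apply decide_eq_true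
          apply (pv_bridge c p hp (s + p.length - 1) he).mpr
          refine ⟨by omega, ?_⟩
          rw [show s + p.length - 1 + 1 - p.length = s by omega]
          exact hpre
        · intro y _ hy
          apply Bool.eq_false_iff.mpr
          intro hc
          have hsuf : p <:+ c.take (y + 1) := of_decide_eq_true hc
          have hylt : y < c.length := by omega
          have hbr := (pv_bridge c p hp y hylt).mp hsuf
          have hlt : y + 1 - p.length < s := by omega
          have := hmin (y + 1 - p.length) (Nat.zero_le _) hlt
          rw [Bool.eq_false_iff] at this
          exact this (List.isPrefixOf_iff_prefix.mpr hbr.2)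
      rw [hE]
      show (s : Int) + (p.length : Int) - 1 = ((s + p.length - 1 : Nat) : Int)
      omega


lemma pv_main : ∀ (c p : List String), p ≠ [] →
    lastTokenIndex c p = lastTokenIndex_alt c p := by
  intro c p hp
  have hm : ¬ p.length = 0 := by simpa using hp
  have hA : lastTokenIndex c p =
      (match pvFFind (fun s => p.isPrefixOf (c.drop s)) (c.length + 1) 0 with
       | some s => (s : Int) + p.length - 1 | none => -1) := by
    show pvALoop c p (p.getD 0 "") p.length 0 = _
    rw [pvALoop_eq c p hp 0, Nat.sub_zero]
  have hB : lastTokenIndex_alt c p =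
      (match pvFFind (fun e => decide (p <:+ c.take (e + 1))) c.length 0 with
       | some e => (e : Int) | none => -1) := by
    show (if p.length = 0 then -1 else pvSearch p (pvBuild p) p.length c 0 0) = _
    rw [if_neg hm]
    have hK0 : (0 : Nat) = pvKA p [] := by
      symm
      rw [pvKA, Nat.findGreatest_eq_zero_iff]
      intro n hn1 _ hc
      have : p.take n = [] := List.suffix_nil.mp hc
      rw [List.take_eq_nil_iff] at this
      rcases this with h | h
      · omega
      · exact hp h
    have hpre0 : ∀ t', t' <+: ([] : List String) → ¬ p <:+ t' := by
      intro t' ht' hc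
      rw [List.prefix_nil.mp ht'] at hc
      exact hp (List.suffix_nil.mp hc)
    have := pvSearch_eq c p (pvBuild p) hp (pvBuild_ok p hp) c [] 0 (by simp) hK0 hpre0
    simpa using this
  rw [hA, hB, pv_glue c p hp]

-- ===== VERDICT (by name: the statement is the Claim_ definition above) =====
theorem lastTokenIndex_spec : Claim_equal_lastTokenIndex := by
  intro caption_tokens phrase_tokens _ hpre
  show lastTokenIndex caption_tokens phrase_tokens = lastTokenIndex_alt caption_tokens phrase_tokens
  exact pv_main caption_tokens phrase_tokens hpre
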